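-- pv_equiv track=rewrite | github.com/marc-rutzou/CS_PRIMER | AOC/day4/aoc4.py | check_pss
-- ===== SOURCE A (Python) =====
-- def check_pss(pss):
--     directions = [  (1, 1), (-1, -1), (-1, 1), (1, -1),  #diagonal
--                     (0, 1), (0, -1),  #horizontal
--                     (1, 0), (-1, 0)   #vertical
--                  ]
--     solutions = []
--     for ps in pss:
--         deltas = [(a - x, b - y) for (x, y), (a, b) in zip(ps, ps[1:])]
--         if len(set(deltas)) == 1 and deltas[0] in directions:
--             solutions.append(ps)
--     return solutions
-- ===== SOURCE B (Python) =====
-- DIRS = {(1, 1), (-1, -1), (-1, 1), (1, -1), (0, 1), (0, -1), (1, 0), (-1, 0)}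
--
-- def check_pss(pss):
--     out = []
--     for ps in pss:
--         if len(ps) < 2:
--             continue
--         (x0, y0), (x1, y1) = ps[0], ps[1]
--         d = (x1 - x0, y1 - y0)
--         if d not in DIRS:
--             continue
--         if all(p == (x0 + i * d[0], y0 + i * d[1]) for i, p in enumerate(ps)):
--             out.append(ps)
--     return out
-- ===== Notes on version B (the rewrite author's own statement) =====
-- stated objective: alternative
-- what changed: B anchors on the first step: instead of materialising the whole delta list and deduplicating it with set(), it checks the single step d = ps[1]-ps[0] against the 8 directions first and then verifies positionally that every point equals ps[0] + i*d, short-circuiting on the first mismatch.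
import Mathlib
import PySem

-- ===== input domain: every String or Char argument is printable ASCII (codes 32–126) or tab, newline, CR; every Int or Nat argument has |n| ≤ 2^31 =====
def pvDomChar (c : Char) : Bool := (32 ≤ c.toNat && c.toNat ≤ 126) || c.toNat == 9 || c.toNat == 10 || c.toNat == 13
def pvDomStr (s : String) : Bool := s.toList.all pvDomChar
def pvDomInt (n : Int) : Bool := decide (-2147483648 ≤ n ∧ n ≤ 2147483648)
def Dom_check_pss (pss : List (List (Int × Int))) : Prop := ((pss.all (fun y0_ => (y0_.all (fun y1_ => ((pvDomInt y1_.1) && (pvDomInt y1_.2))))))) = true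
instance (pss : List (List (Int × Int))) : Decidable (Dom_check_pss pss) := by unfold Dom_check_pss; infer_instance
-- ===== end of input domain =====

-- B replaces A's delta-list + set() deduplication by an anchored positional check:
-- the single step d = ps[1]-ps[0] is tested against the 8 directions first, then every
-- point is verified to equal ps[0] + i*d (objective: alternative decomposition, same cost).

-- ===== PORT A =====
def pvDirections : List (Int × Int) :=
  [(1, 1), (-1, -1), (-1, 1), (1, -1), (0, 1), (0, -1), (1, 0), (-1, 0)]

def pvDelta (pq : (Int × Int) × (Int × Int)) : Int × Int :=
  (pq.2.1 - pq.1.1, pq.2.2 - pq.1.2)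

-- the loop-body condition: len(set(deltas)) == 1 and deltas[0] in directions
def pvCondA (ps : List (Int × Int)) : Bool :=
  let deltas := (List.zip ps (PySem.List.slice ps (some 1) none)).map pvDelta
  ((PySem.Set.ofList deltas).length == 1) &&
    ((PySem.List.pyGet? deltas 0).elim false (fun d => pvDirections.contains d))

def check_pss (pss : List (List (Int × Int))) : List (List (Int × Int)) :=
  pss.foldl (fun solutions ps => if pvCondA ps then solutions ++ [ps] else solutions) []

-- ===== PORT B =====
def pvDirs : PySem.Set (Int × Int) :=
  PySem.Set.ofList [(1, 1), (-1, -1), (-1, 1), (1, -1), (0, 1), (0, -1), (1, 0), (-1, 0)]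

-- the loop body of B: skip if len < 2, skip if the first step is not a direction,
-- keep iff every point is ps[0] + i*d
def pvCondB (ps : List (Int × Int)) : Bool :=
  match ps with
  | p0 :: p1 :: _ =>
    let d : Int × Int := (p1.1 - p0.1, p1.2 - p0.2)
    if PySem.Set.contains pvDirs d then
      (PySem.List.enumerate ps 0).all
        (fun ip => ip.2 == (p0.1 + ip.1 * d.1, p0.2 + ip.1 * d.2))
    else false
  | _ => false

def check_pss_alt (pss : List (List (Int × Int))) : List (List (Int × Int)) :=
  pss.foldl (fun out ps => if pvCondB ps then out ++ [ps] else out) []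

-- ===== PRECONDITION & SPEC =====
def Spec_check_pss (pss : List (List (Int × Int))) (out : List (List (Int × Int))) : Prop := out = check_pss_alt pss
instance (pss : List (List (Int × Int))) (out : List (List (Int × Int))) : Decidable (Spec_check_pss pss out) := by unfold Spec_check_pss; infer_instance

-- ===== CLAIM (what is proved, stated in full; the proofs are below) =====
def Claim_equal_check_pss : Prop := ∀ (pss : List (List (Int × Int))), Dom_check_pss pss → Spec_check_pss pss (check_pss pss)

-- ===== LEMMAS AND PROOFS =====

-- Set.add never shrinks, so foldl add over more elements never shrinks
theorem pv_foldl_add_len_le (ys : List (Int × Int)) :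
    ∀ s : PySem.Set (Int × Int), s.length ≤ (ys.foldl PySem.Set.add s).length := by
  induction ys with
  | nil => intro s; simp
  | cons y ys ih =>
      intro s
      refine le_trans ?_ (ih (PySem.Set.add s y))
      simp [PySem.Set.add]
      split <;> simp

-- len(set(d :: xs)) == 1  iff every element of xs equals d
theorem pv_set_len_one (d : Int × Int) (xs : List (Int × Int)) :
    ((PySem.Set.ofList (d :: xs)).length == 1) = xs.all (· == d) := by
  have h0 : PySem.Set.ofList (d :: xs) = xs.foldl PySem.Set.add [d] := by
    simp [PySem.Set.ofList_eq_foldl, List.foldl_cons, PySem.Set.add, PySem.Set.contains]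
  rw [h0]
  clear h0
  induction xs with
  | nil => simp
  | cons x xs ih =>
      by_cases hx : x = d
      · subst hx
        simp [List.foldl_cons, ih]
      · have hc : PySem.Set.contains [d] x = false := by
          unfold PySem.Set.contains
          simpa using fun h => (hx h).elim
        have hadd : PySem.Set.add [d] x = [d, x] := by
          unfold PySem.Set.add
          rw [hc]
          simp
        have h2 : 2 ≤ ((x :: xs).foldl PySem.Set.add [d]).length := by
          rw [List.foldl_cons, hadd]
          exact pv_foldl_add_len_le xs [d, x]
        have hL : (((x :: xs).foldl PySem.Set.add [d]).length == 1) = false := by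
          simp only [beq_eq_false_iff_ne]; omega
        rw [hL]
        simp [hx]

-- deltas of the chain starting at p all equal d  iff  every later point sits at p0 + i*d,
-- provided p itself sits at p0 + n*d
theorem pv_chain (d p0 : Int × Int) (ps : List (Int × Int)) :
    ∀ (p : Int × Int) (n : Int),
      p.1 = p0.1 + n * d.1 → p.2 = p0.2 + n * d.2 →
      (((List.zip (p :: ps) ps).map pvDelta).all (· == d)) =
        (PySem.List.enumerate ps (n + 1)).all
          (fun ip => ip.2 == (p0.1 + ip.1 * d.1, p0.2 + ip.1 * d.2)) := by
  induction ps with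
  | nil => intro p n _ _; simp [PySem.List.enumerate]
  | cons q qs ih =>
      intro p n h1 h2
      have hhead : (pvDelta (p, q) == d) =
          (q == (p0.1 + (n + 1) * d.1, p0.2 + (n + 1) * d.2)) := by
        rw [Bool.eq_iff_iff]
        simp only [pvDelta, beq_iff_eq, Prod.ext_iff]
        constructor
        · rintro ⟨u, v⟩
          constructor <;> nlinarith
        · rintro ⟨u, v⟩
          constructor <;> nlinarith
      rw [List.zip_cons_cons, List.map_cons, List.all_cons,
          PySem.List.enumerate_cons, List.all_cons, hhead]
      cases hqe : (q == (p0.1 + (n + 1) * d.1, p0.2 + (n + 1) * d.2)) with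
      | false => simp
      | true =>
          have hq := eq_of_beq hqe
          simp only [Bool.true_and]
          exact ih q (n + 1) (by rw [hq]) (by rw [hq])

-- the loop conditions agree on every sequence
theorem pv_cond_eq (ps : List (Int × Int)) : pvCondA ps = pvCondB ps := by
  match ps with
  | [] => rfl
  | [p] =>
      simp [pvCondA, pvCondB, PySem.List.slice_from_one]
  | p0 :: p1 :: rest =>
      have htail : PySem.List.slice (p0 :: p1 :: rest) (some 1) none = p1 :: rest :=
        PySem.List.slice_from_one _
      set d : Int × Int := (p1.1 - p0.1, p1.2 - p0.2) with hd
      have hdelta : pvDelta (p0, p1) = d := by simp [pvDelta, hd]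
      have hdirs : pvDirections.contains d = PySem.Set.contains pvDirs d := by
        simp [pvDirections, pvDirs, PySem.Set.contains, PySem.Set.ofList]
      have hset := pv_set_len_one d ((List.zip (p1 :: rest) rest).map pvDelta)
      have hch := pv_chain d p0 rest p1 1 (by simp [hd]) (by simp [hd])
      unfold pvCondA pvCondB
      rw [htail]
      simp only [List.zip_cons_cons, List.map_cons, hdelta,
        PySem.List.pyGet?, PySem.List.pyIdx?]
      norm_num
      rw [hset, hch]
      have h12 : (1 + 1 : Int) = 2 := by norm_num
      rw [h12]
      have hmem : (decide (d ∈ pvDirections)) = (decide (d ∈ pvDirs)) := by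
        simp [pvDirections, pvDirs, PySem.Set.ofList]
      rw [hmem, Bool.and_comm]

-- ===== VERDICT (by name: the statement is the Claim_ definition above) =====
theorem check_pss_spec : Claim_equal_check_pss := by
  intro pss _
  unfold Spec_check_pss check_pss check_pss_alt
  have : (fun (solutions : List (List (Int × Int))) ps =>
        if pvCondA ps then solutions ++ [ps] else solutions) =
      (fun out ps => if pvCondB ps then out ++ [ps] else out) := by
    funext out ps; rw [pv_cond_eq]
  rw [this]
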